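-- pv_equiv track=rewrite | github.com/yananfei-Bette/Leetcode | GoogleOA/email.py | numSameEmailAddress
-- ===== SOURCE A (Python) =====
-- def numSameEmailAddress(s):
--     dic = {}
--     for email in s:
--         local, domain = email.split('@')
--         local = ''.join(email.split('.'))
--         while local.find('+') >= 0:
--             local = local[:local.find('+')]
--         email = local+'@'+domain
--         if email not in dic:
--             dic[email] = 1
--         else:
--             dic[email] += 1
--     res = 0
--     for k in dic.keys():
--         if dic[k] > 1:
--             res += 1
--     return res
-- ===== SOURCE B (Python) =====
-- def numSameEmailAddress(s):
--     keys = []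
--     for email in s:
--         _, domain = email.split('@')
--         local = ''.join(email.split('.'))
--         i = local.find('+')
--         if i >= 0:
--             local = local[:i]
--         keys.append(local + '@' + domain)
--     keys.sort()
--     prev = None
--     runlen = 0
--     res = 0
--     for k in keys:
--         if k == prev:
--             runlen += 1
--         else:
--             if runlen > 1:
--                 res += 1
--             prev = k
--             runlen = 1
--     if runlen > 1:
--         res += 1
--     return res
-- ===== Notes on version B (the rewrite author's own statement) =====
-- stated objective: alternative
-- what changed: B keeps A's exact normalization but replaces the dict tally and key scan by building the list of normalized keys, sorting it, and counting runs of equal consecutive keys longer than one in a single stateful pass.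
import Mathlib
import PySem

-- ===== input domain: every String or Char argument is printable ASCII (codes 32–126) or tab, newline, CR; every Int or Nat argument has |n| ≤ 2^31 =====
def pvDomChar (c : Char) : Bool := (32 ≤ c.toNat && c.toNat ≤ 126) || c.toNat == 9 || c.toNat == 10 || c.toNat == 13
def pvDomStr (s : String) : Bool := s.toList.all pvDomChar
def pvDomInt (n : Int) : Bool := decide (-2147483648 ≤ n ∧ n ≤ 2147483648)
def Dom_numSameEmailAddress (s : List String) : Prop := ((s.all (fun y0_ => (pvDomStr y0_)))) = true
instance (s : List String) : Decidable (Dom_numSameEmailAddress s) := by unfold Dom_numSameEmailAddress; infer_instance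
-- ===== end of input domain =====

-- B replaces A's hash-map tally (dict of counts, then a scan of the keys) by building the
-- list of normalized keys, sorting it, and counting runs of equal consecutive keys of
-- length > 1 in one pass (objective: alternative algorithm, same normalization).

-- ===== PORT A =====
-- A's `while local.find('+') >= 0: local = local[:local.find('+')]`
def pvTruncA (l : List Char) : List Char :=
  if h : 0 ≤ PySem.Chars.find l ['+'] then
    pvTruncA (PySem.List.slice l none (some (PySem.Chars.find l ['+'])))
  else l
termination_by l.length
decreasing_by
  have hspec := PySem.Chars.find_spec h
  have hlt : (PySem.Chars.find l ['+']).toNat < l.length := by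
    by_contra hge
    rw [not_lt] at hge
    have hdrop : List.drop (PySem.Chars.find l ['+']).toNat l = [] :=
      List.drop_eq_nil_of_le hge
    have := hspec.1
    rw [hdrop] at this
    simp at this
  rw [PySem.List.slice_to _ h]
  simp only [List.length_take]
  omega

-- the per-email body of A's first loop: split, normalize, truncate, rebuild the key
def pvKeyA (e : List Char) : List Char :=
  let parts := (PySem.Chars.split? e ['@']).getD []
  let domain := parts.getD 1 []       -- `local, domain = email.split('@')` (local is overwritten next)
  let l0 := PySem.Chars.join [] ((PySem.Chars.split? e ['.']).getD [])
  pvTruncA l0 ++ ['@'] ++ domain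

def numSameEmailAddress (s : List String) : Int :=
  let dic := s.foldl (fun d email =>
      let k := pvKeyA email.toList
      if d.contains k = false then d.insert k 1 else d.insert k (d.getD k 0 + 1))
    (PySem.Dict.empty : PySem.Dict (List Char) Int)
  dic.keys.foldl (fun r k => if 1 < dic.getD k 0 then r + 1 else r) 0

-- ===== PORT B =====
-- B's normalization: same split/join, but a single find + conditional truncation
def pvKeyB (e : List Char) : List Char :=
  let parts := (PySem.Chars.split? e ['@']).getD []
  let domain := parts.getD 1 []
  let l0 := PySem.Chars.join [] ((PySem.Chars.split? e ['.']).getD [])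
  let i := PySem.Chars.find l0 ['+']
  let l1 := if 0 ≤ i then PySem.List.slice l0 none (some i) else l0
  l1 ++ ['@'] ++ domain

-- B's run-counting loop body: state = (prev, runlen, res)
def pvStepB (st : Option (List Char) × Int × Int) (k : List Char) : Option (List Char) × Int × Int :=
  if some k = st.1 then (st.1, st.2.1 + 1, st.2.2)
  else (some k, 1, st.2.2 + (if 1 < st.2.1 then 1 else 0))

def numSameEmailAddress_alt (s : List String) : Int :=
  let keys := s.foldl (fun acc email => acc ++ [pvKeyB email.toList]) []
  let ks := PySem.List.sorted keys (fun x => x) false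
  let st := ks.foldl pvStepB (none, 0, 0)
  st.2.2 + (if 1 < st.2.1 then 1 else 0)

-- ===== PRECONDITION & SPEC =====
-- Pre_ excludes exactly the inputs where A raises ValueError: an email whose '@'-count is ≠ 1
-- makes `local, domain = email.split('@')` fail to unpack (B raises there identically).
def Pre_numSameEmailAddress (s : List String) : Prop :=
  ∀ e ∈ s, PySem.Str.count e "@" = 1
instance (s : List String) : Decidable (Pre_numSameEmailAddress s) := by
  unfold Pre_numSameEmailAddress; infer_instance
def pvWitness_numSameEmailAddress : List String := ["a.b@x.com", "ab@x.com", "c+d@y"]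
def Spec_numSameEmailAddress (s : List String) (out : Int) : Prop := out = numSameEmailAddress_alt s
instance (s : List String) (out : Int) : Decidable (Spec_numSameEmailAddress s out) := by
  unfold Spec_numSameEmailAddress; infer_instance

-- ===== CLAIM (what is proved, stated in full; the proofs are below) =====
def Claim_equal_numSameEmailAddress : Prop := ∀ (s : List String), Dom_numSameEmailAddress s → Pre_numSameEmailAddress s → Spec_numSameEmailAddress s (numSameEmailAddress s)

-- ===== LEMMAS AND PROOFS =====

-- one truncation at the first '+' already removes every '+': A's while loop runs at most once
lemma pv_find_take (l : List Char) (h : 0 ≤ PySem.Chars.find l ['+']) :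
    PySem.Chars.find (List.take (PySem.Chars.find l ['+']).toNat l) ['+'] = -1 := by
  rw [PySem.Chars.find_eq_neg_one_iff]
  intro hinf
  have hmem : '+' ∈ List.take (PySem.Chars.find l ['+']).toNat l :=
    hinf.sublist.subset (by simp)
  obtain ⟨j, hj, hget⟩ := List.mem_iff_getElem.mp hmem
  have hjl : j < l.length := by
    have := hj; simp only [List.length_take] at this; omega
  have hji : j < (PySem.Chars.find l ['+']).toNat := by
    have := hj; simp only [List.length_take] at this; omega
  rw [List.getElem_take] at hget
  have hpre : ['+'] <+: List.drop j l := by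
    rw [List.drop_eq_getElem_cons hjl]
    exact ⟨List.drop (j + 1) l, by simp [hget]⟩
  exact (PySem.Chars.find_spec h).2 j hji hpre

lemma pvTruncA_eq (l : List Char) :
    pvTruncA l = if 0 ≤ PySem.Chars.find l ['+'] then
        PySem.List.slice l none (some (PySem.Chars.find l ['+'])) else l := by
  rw [pvTruncA]
  split_ifs with h
  · rw [pvTruncA, dif_neg]
    rw [PySem.List.slice_to _ h, pv_find_take l h]
    norm_num
  · rfl

lemma pvKey_eq (e : List Char) : pvKeyB e = pvKeyA e := by
  simp only [pvKeyA, pvKeyB, pvTruncA_eq]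

-- A's value in closed form: number of distinct keys whose multiplicity exceeds 1
lemma pvA_eval (s : List String) :
    numSameEmailAddress s =
      ((PySem.Set.ofList (s.map (fun e => pvKeyA e.toList))).countP
        (fun k => decide (1 < (s.map (fun e => pvKeyA e.toList)).count k)) : Int) := by
  have h1 : (s.foldl (fun d email =>
      if d.contains (pvKeyA email.toList) = false then d.insert (pvKeyA email.toList) 1
      else d.insert (pvKeyA email.toList) (d.getD (pvKeyA email.toList) 0 + 1))
      (PySem.Dict.empty : PySem.Dict (List Char) Int))
      = PySem.Dict.counter (s.map fun e => pvKeyA e.toList) := by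
    rw [← PySem.Dict.foldl_insert_getD_add_one_eq_counter, List.foldl_map]
    congr 1
    funext d e
    by_cases hc : d.contains (pvKeyA e.toList) = false
    · simp [hc, PySem.Dict.getD_of_not_contains d _ hc]
    · simp [hc]
  simp only [numSameEmailAddress]
  rw [h1, PySem.Dict.keys_counter]
  simp only [PySem.Dict.getD_counter]
  rw [PySem.List.foldl_ite_add_one (fun k => 1 < ((s.map fun e => pvKeyA e.toList).count k : Int))]
  rw [zero_add]
  congr 1
  apply List.countP_congr
  intro k _
  simp

-- peel one distinct value off the closed-form count
lemma pv_peel (b : List Char) (t : List (List Char)) :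
    (PySem.Set.ofList (b :: t)).countP (fun k => decide (1 < (b :: t).count k))
      = (if 1 < t.count b + 1 then 1 else 0)
        + (PySem.Set.ofList (t.filter (fun x => x ≠ b))).countP
            (fun k => decide (1 < (t.filter (fun x => x ≠ b)).count k)) := by
  have hnd2 : (b :: PySem.Set.ofList (t.filter fun x => x ≠ b)).Nodup := by
    refine List.nodup_cons.mpr ⟨?_, PySem.Set.nodup_ofList _⟩
    intro hb
    rw [PySem.Set.mem_ofList, List.mem_filter] at hb
    simp at hb
  have hperm : (PySem.Set.ofList (b :: t)).Perm
      (b :: PySem.Set.ofList (t.filter fun x => x ≠ b)) := by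
    rw [List.perm_ext_iff_of_nodup (PySem.Set.nodup_ofList _) hnd2]
    intro x
    rw [PySem.Set.mem_ofList]
    simp only [List.mem_cons, PySem.Set.mem_ofList, List.mem_filter]
    by_cases hx : x = b <;> simp [hx]
  rw [hperm.countP_eq, List.countP_cons]
  have htail : (PySem.Set.ofList (t.filter fun x => x ≠ b)).countP
        (fun k => decide (1 < (b :: t).count k))
      = (PySem.Set.ofList (t.filter fun x => x ≠ b)).countP
        (fun k => decide (1 < (t.filter fun x => x ≠ b).count k)) := by
    apply List.countP_congr
    intro k hk
    rw [PySem.Set.mem_ofList, List.mem_filter] at hk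
    have hkb : k ≠ b := by simpa using hk.2
    rw [List.count_cons_of_ne (Ne.symm hkb), List.count_filter (by simpa using hkb)]
  rw [htail]
  simp only [List.count_cons_self, decide_eq_true_eq]
  omega

-- invariant of B's run-counting fold on a sorted tail
lemma pv_runfold (t : List (List Char)) (a : List Char) (m r : Int) (hm : 1 ≤ m)
    (hp : (a :: t).Pairwise (· ≤ ·)) :
    (t.foldl pvStepB (some a, m, r)).2.2
        + (if 1 < (t.foldl pvStepB (some a, m, r)).2.1 then 1 else 0)
      = r + (if 1 < m + (t.count a : Int) then 1 else 0)
        + ((PySem.Set.ofList (t.filter (fun x => x ≠ a))).countP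
            (fun k => decide (1 < (t.filter (fun x => x ≠ a)).count k)) : Int) := by
  induction t generalizing a m r with
  | nil => simp
  | cons b t2 ih =>
    rw [List.foldl_cons]
    by_cases hba : b = a
    · subst hba
      have hstep : pvStepB (some b, m, r) b = (some b, m + 1, r) := by
        simp [pvStepB]
      rw [hstep]
      have hp' : (b :: t2).Pairwise (fun x y => x ≤ y) := by
        rcases List.pairwise_cons.mp hp with ⟨h1, h2⟩
        rcases List.pairwise_cons.mp h2 with ⟨_, h4⟩
        exact List.pairwise_cons.mpr ⟨fun x hx => h1 x (List.mem_cons_of_mem _ hx), h4⟩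
      rw [ih b (m + 1) r (by omega) hp']
      have hcnt : (b :: t2).count b = t2.count b + 1 := List.count_cons_self
      have hfil : (b :: t2).filter (fun x => x ≠ b) = t2.filter (fun x => x ≠ b) := by
        simp
      rw [hcnt, hfil]
      have : (1 < m + 1 + (t2.count b : Int)) ↔ (1 < m + ((t2.count b + 1 : Nat) : Int)) := by
        push_cast; omega
      rw [if_congr this rfl rfl]
    · have hstep : pvStepB (some a, m, r) b
          = (some b, 1, r + (if 1 < m then 1 else 0)) := by
        simp [pvStepB, hba]
      rw [hstep]
      rcases List.pairwise_cons.mp hp with ⟨h1, h2⟩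
      rcases List.pairwise_cons.mp h2 with ⟨h3, _⟩
      have hab : a ≤ b := h1 b List.mem_cons_self
      have hnmem : a ∉ t2 := by
        intro hx
        exact hba (le_antisymm (h3 a hx) hab)
      rw [ih b 1 (r + (if 1 < m then 1 else 0)) (by omega) h2]
      have hcnt : (b :: t2).count a = 0 := by
        rw [List.count_eq_zero]
        intro hx
        rcases List.mem_cons.mp hx with h | h
        · exact hba h.symm
        · exact hnmem h
      have hfil : (b :: t2).filter (fun x => x ≠ a) = b :: t2 := by
        rw [List.filter_cons]
        have hb : (decide (b ≠ a)) = true := by simpa using hba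
        rw [if_pos hb, List.filter_eq_self.mpr]
        intro x hx
        simp only [ne_eq, decide_not, Bool.not_eq_eq_eq_not, Bool.not_true, decide_eq_false_iff_not]
        intro he
        exact hnmem (he ▸ hx)
      rw [hcnt, hfil, pv_peel b t2]
      push_cast
      split_ifs <;> omega

-- the sort in the port elaborates with core's (defeq) List order instances; align them
lemma pv_sorted_inst (xs : List (List Char)) :
    PySem.List.sorted xs (fun x => x) false
      = @PySem.List.sorted (List Char) (List Char) List.instLinearOrder.toLT
          LinearOrder.toDecidableLT xs (fun x => x) false := by
  congr 1

lemma pvB_eval (s : List String) :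
    numSameEmailAddress_alt s =
      ((PySem.Set.ofList (s.map (fun e => pvKeyB e.toList))).countP
        (fun k => decide (1 < (s.map (fun e => pvKeyB e.toList)).count k)) : Int) := by
  simp only [numSameEmailAddress_alt]
  rw [PySem.List.foldl_append_singleton_eq_map, List.nil_append, pv_sorted_inst]
  cases hM : @PySem.List.sorted (List Char) (List Char) List.instLinearOrder.toLT
      LinearOrder.toDecidableLT (s.map fun e => pvKeyB e.toList) (fun x => x) false with
  | nil =>
    rw [@PySem.List.sorted_eq_nil_iff (List Char) (List Char) List.instLinearOrder.toLT
      LinearOrder.toDecidableLT] at hM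
    rw [hM]
    simp
  | cons a t =>
    have hstep : pvStepB (none, 0, 0) a = (some a, 1, 0) := by simp [pvStepB]
    rw [List.foldl_cons, hstep]
    have hp : (a :: t).Pairwise (fun x y : List Char => x ≤ y) := by
      have h := PySem.List.sorted_pairwise (s.map fun e => pvKeyB e.toList) (fun x => x)
      rw [hM] at h
      exact h
    rw [pv_runfold t a 1 0 (by omega) hp]
    have hperm : (a :: t).Perm (s.map fun e => pvKeyB e.toList) := by
      rw [← hM]
      exact @PySem.List.sorted_perm (List Char) (List Char) List.instLinearOrder.toLT
        LinearOrder.toDecidableLT _ _ _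
    have hcnt : ∀ k : List Char, (s.map fun e => pvKeyB e.toList).count k = (a :: t).count k :=
      fun k => (hperm.count_eq k).symm
    have hperm2 : (PySem.Set.ofList (s.map fun e => pvKeyB e.toList)).Perm
        (PySem.Set.ofList (a :: t)) := by
      rw [List.perm_ext_iff_of_nodup (PySem.Set.nodup_ofList _) (PySem.Set.nodup_ofList _)]
      intro x
      rw [PySem.Set.mem_ofList, PySem.Set.mem_ofList]
      exact (hperm.mem_iff).symm
    simp only [hcnt]
    rw [hperm2.countP_eq, pv_peel a t]
    push_cast
    split_ifs <;> omega

-- ===== VERDICT (by name: the statement is the Claim_ definition above) =====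
theorem numSameEmailAddress_spec : Claim_equal_numSameEmailAddress := by
  intro s _ _
  unfold Spec_numSameEmailAddress
  rw [pvA_eval, pvB_eval]
  simp [pvKey_eq]
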